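-- pv_equiv track=rewrite | github.com/ryanyoung0/School_Work | CSE2050/Labs/Lab 01 Simple substitution ciphers starter code/cipher.py | encode_dictionary
-- ===== SOURCE A (Python) =====
-- def encode_dictionary(e_dict, plaintext):
-- 	ciphertext = ""
-- 	plaintext = plaintext.upper()
-- 	for char in plaintext:
-- 		if char is " ":
-- 			ciphertext = ciphertext + "-"
-- 		elif char in e_dict:
-- 			ciphertext = ciphertext + e_dict[char]
-- 		else:
-- 			ciphertext = ciphertext + char
-- 	return(ciphertext)
-- ===== SOURCE B (Python) =====
-- def encode_dictionary(e_dict, plaintext):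
--     table = {}
--     for k, v in e_dict.items():
--         if len(k) == 1:
--             table.setdefault(ord(k), v)
--     table[ord(' ')] = '-'
--     return plaintext.upper().translate(table)
-- ===== Notes on version B (the rewrite author's own statement) =====
-- stated objective: idiomatic
-- what changed: Replaces the per-character if/elif/else loop with one precomputed ord->replacement translation table (space entry overriding, multi-character keys skipped since they can never match a single character) and a single plaintext.upper().translate(table) pass, moving the scan into the C-level str.translate.
import Mathlib
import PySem

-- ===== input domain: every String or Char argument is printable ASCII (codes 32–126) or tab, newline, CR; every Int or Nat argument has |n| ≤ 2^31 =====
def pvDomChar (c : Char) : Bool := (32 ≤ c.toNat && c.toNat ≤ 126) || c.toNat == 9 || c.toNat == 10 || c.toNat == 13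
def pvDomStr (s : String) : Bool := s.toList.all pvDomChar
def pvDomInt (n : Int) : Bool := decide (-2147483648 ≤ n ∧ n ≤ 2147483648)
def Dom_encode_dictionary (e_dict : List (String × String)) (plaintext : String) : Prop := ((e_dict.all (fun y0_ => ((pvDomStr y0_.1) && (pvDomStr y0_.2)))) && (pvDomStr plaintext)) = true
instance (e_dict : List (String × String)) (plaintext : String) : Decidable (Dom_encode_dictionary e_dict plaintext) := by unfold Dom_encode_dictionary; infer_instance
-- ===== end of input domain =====

-- B replaces A's per-character if/elif/else loop by one precomputed ord→replacement
-- translation table (first-match, space overriding) and a single translate pass (idiomatic).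


-- ===== PORT A =====
-- ciphertext = ""; for char in plaintext.upper(): space → "-", key hit → e_dict[char], else char
def encode_dictionary (e_dict : List (String × String)) (plaintext : String) : String :=
  let d := PySem.Dict.mk e_dict
  (PySem.Str.upper plaintext).toList.foldl
    (fun ciphertext char =>
      if char == ' ' then ciphertext ++ "-"
      else if d.contains (String.ofList [char]) then ciphertext ++ d.getD (String.ofList [char]) ""
      else ciphertext ++ String.ofList [char]) ""

-- ===== PORT B =====
-- table = {}; for k, v: if len(k) == 1: table.setdefault(ord(k), v); table[ord(' ')] = '-';
-- return plaintext.upper().translate(table)   (translate ported by hand: each code point mapped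
-- through the table, left unchanged if absent — exact for the string-valued entries built here)
def encode_dictionary_alt (e_dict : List (String × String)) (plaintext : String) : String :=
  let table : PySem.Dict Int String := e_dict.foldl
    (fun t kv =>
      match kv.1.toList with
      | [ch] => t.setdefault (ch.toNat : Int) kv.2   -- ord(k), exact for a length-1 string
      | _ => t) PySem.Dict.empty
  let table := table.insert ((' '.toNat : Int)) "-"
  String.ofList ((PySem.Str.upper plaintext).toList.flatMap
    (fun c => (table.getD (c.toNat : Int) (String.ofList [c])).toList))

-- ===== PRECONDITION & SPEC =====
def Spec_encode_dictionary (e_dict : List (String × String)) (plaintext : String) (out : String) : Prop := out = encode_dictionary_alt e_dict plaintext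
instance (e_dict : List (String × String)) (plaintext : String) (out : String) : Decidable (Spec_encode_dictionary e_dict plaintext out) := by unfold Spec_encode_dictionary; infer_instance

-- ===== CLAIM (what is proved, stated in full; the proofs are below) =====
def Claim_equal_encode_dictionary : Prop := ∀ (e_dict : List (String × String)) (plaintext : String), Dom_encode_dictionary e_dict plaintext → Spec_encode_dictionary e_dict plaintext (encode_dictionary e_dict plaintext)

-- ===== LEMMAS AND PROOFS =====

-- the per-character replacement B's finished table realises
def pvStepB (e_dict : List (String × String)) (c : Char) : List Char :=
  (((e_dict.foldl
    (fun t kv =>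
      match kv.1.toList with
      | [ch] => t.setdefault (ch.toNat : Int) kv.2
      | _ => t) PySem.Dict.empty).insert ((' '.toNat : Int)) "-").getD (c.toNat : Int)
      (String.ofList [c])).toList

theorem pvCharEq {a b : Char} (h : a.toNat = b.toNat) : a = b := by
  apply Char.ext
  exact UInt32.toNat_inj.mp h

-- a length-1 string key hits ord c exactly when it IS the string [c]
theorem singleton_key_eq (k : String) (ch c : Char) (hk : k.toList = [ch]) :
    ((ch.toNat : Int) = (c.toNat : Int)) ↔ k = String.ofList [c] := by
  constructor
  · intro h
    have : ch = c := pvCharEq (by exact_mod_cast h)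
    subst this
    rw [← hk, String.ofList_toList]
  · intro h
    subst h
    simp [String.toList_ofList] at hk
    simp [hk]

-- the setdefault loop realises first-match lookup of single-char keys, seeded by t
theorem table_get?_eq (l : List (String × String)) (t : PySem.Dict Int String) (c : Char) :
    (l.foldl
      (fun t kv =>
        match kv.1.toList with
        | [ch] => t.setdefault (ch.toNat : Int) kv.2
        | _ => t) t).get? (c.toNat : Int)
      = (t.get? (c.toNat : Int)).or ((PySem.Dict.mk l).get? (String.ofList [c])) := by
  induction l generalizing t with
  | nil => simp [PySem.Dict.get?]
  | cons kv rest ih =>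
    obtain ⟨k, v⟩ := kv
    rw [List.foldl_cons, PySem.Dict.get?_mk_cons]
    rcases hk : k.toList with _ | ⟨ch, tl⟩
    · have hne : (k == String.ofList [c]) = false := by
        simp only [beq_eq_false_iff_ne, ne_eq]
        intro h; subst h; simp [String.toList_ofList] at hk
      simp only [hne, Bool.false_eq_true, if_false, ih]
    · rcases tl with _ | ⟨ch2, tl2⟩
      · -- single-char key
        show ((rest.foldl _ (t.setdefault (ch.toNat : Int) v)).get? (c.toNat : Int)) = _
        rw [ih]
        by_cases h : (ch.toNat : Int) = (c.toNat : Int)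
        · have hkc : k = String.ofList [c] := (singleton_key_eq k ch c hk).mp h
          rw [h, PySem.Dict.get?_setdefault_self]
          simp only [hkc, beq_self_eq_true, if_true]
          cases ht : t.get? (c.toNat : Int) <;> simp [Option.or]
        · have hkc : (k == String.ofList [c]) = false := by
            simp only [beq_eq_false_iff_ne, ne_eq]
            intro he; exact h ((singleton_key_eq k ch c hk).mpr he)
          rw [PySem.Dict.get?_setdefault_of_ne _ _ (fun he => h (Eq.symm he))]
          simp only [hkc, Bool.false_eq_true, if_false]
      · have hne : (k == String.ofList [c]) = false := by
          simp only [beq_eq_false_iff_ne, ne_eq]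
          intro h; subst h; simp [String.toList_ofList] at hk
        simp only [hne, Bool.false_eq_true, if_false, ih]

-- pointwise: B's table entry for c is exactly A's branch result
theorem step_eq (e_dict : List (String × String)) (c : Char) :
    String.ofList (pvStepB e_dict c)
      = (if c == ' ' then "-"
         else if (PySem.Dict.mk e_dict).contains (String.ofList [c]) then
           (PySem.Dict.mk e_dict).getD (String.ofList [c]) ""
         else String.ofList [c]) := by
  unfold pvStepB
  by_cases hc : c = ' '
  · subst hc
    rw [PySem.Dict.getD_insert_self]
    simp
  · have hne : (c.toNat : Int) ≠ ((' '.toNat : Int)) := by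
      intro h
      exact hc (pvCharEq (by exact_mod_cast h))
    rw [PySem.Dict.getD_insert_of_ne _ _ _ hne,
        PySem.Dict.getD_eq_get?_getD, table_get?_eq, PySem.Dict.get?_empty]
    simp only [Option.none_or, beq_iff_eq, hc, if_false]
    rw [PySem.Dict.contains_eq_isSome_get?, PySem.Dict.getD_eq_get?_getD]
    cases h : (PySem.Dict.mk e_dict).get? (String.ofList [c]) <;>
      simp [String.ofList_toList]

-- A's accumulator loop, flattened
theorem foldl_append_ofList (l : List Char) (f : Char → List Char) (s : String) :
    l.foldl (fun acc c => acc ++ String.ofList (f c)) s = s ++ String.ofList (l.flatMap f) := by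
  induction l generalizing s with
  | nil => simp [String.append_empty]
  | cons c rest ih =>
    rw [List.foldl_cons, ih, List.flatMap_cons, String.ofList_append, String.append_assoc]

-- ===== VERDICT (by name: the statement is the Claim_ definition above) =====
theorem encode_dictionary_spec : Claim_equal_encode_dictionary := by
  intro e_dict plaintext _
  show _ = _
  simp only [encode_dictionary, encode_dictionary_alt]
  have hstep : ∀ (acc : String) (c : Char), c ∈ (PySem.Str.upper plaintext).toList →
      (if c == ' ' then acc ++ "-"
       else if (PySem.Dict.mk e_dict).contains (String.ofList [c]) then
         acc ++ (PySem.Dict.mk e_dict).getD (String.ofList [c]) ""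
       else acc ++ String.ofList [c])
      = acc ++ String.ofList (pvStepB e_dict c) := by
    intro acc c _
    rw [step_eq]
    split_ifs <;> rfl
  rw [List.foldl_ext _ (fun acc c => acc ++ String.ofList (pvStepB e_dict c)) "" hstep,
      foldl_append_ofList _ (pvStepB e_dict) "", String.empty_append]
  rfl
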